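-- pv_equiv track=rewrite | github.com/NEhlen/aoc2024 | 21/day21.py | numpad2robot
-- ===== SOURCE A (Python) =====
-- numpad_coords = {
--     "7": 0 + 0j,
--     "8": 1 + 0j,
--     "9": 2 + 0j,
--     "4": 0 + 1j,
--     "5": 1 + 1j,
--     "6": 2 + 1j,
--     "1": 0 + 2j,
--     "2": 1 + 2j,
--     "3": 2 + 2j,
--     "0": 1 + 3j,
--     "A": 2 + 3j,
-- }
--
-- forbidden_numpad = 0 + 3j
--
-- def numpad2robot(numpad: str):
--     cur_pos = "A"
--     movements_numpad = []
--     movement_counter = 1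
--     for c in numpad:
--         movement_counter *= 1
--         diff = numpad_coords[c] - numpad_coords[cur_pos]
--         movement = ""
--         if (
--             numpad_coords[c].real + 1j * numpad_coords[cur_pos].imag == forbidden_numpad
--         ) or (
--             numpad_coords[cur_pos].real + 1j * numpad_coords[c].imag == forbidden_numpad
--         ):
--
--             if diff.real > 0:
--                 movement += ">" * int(diff.real)
--
--             if diff.imag >= 0:
--                 movement += "v" * int(diff.imag)
--
--             if diff.imag < 0:
--                 movement += "^" * int(-diff.imag)
--
--             if diff.real <= 0:
--                 movement += "<" * int(-diff.real)
--
--         else: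
--             if diff.real <= 0:
--                 movement += "<" * int(-diff.real)
--
--             if diff.imag < 0:
--                 movement += "^" * int(-diff.imag)
--
--             if diff.imag >= 0:
--                 movement += "v" * int(diff.imag)
--
--             if diff.real > 0:
--                 movement += ">" * int(diff.real)
--
--         movement += "A"
--         movements_numpad.append(movement)
--         cur_pos = c
--
--     return "".join(movements_numpad)
-- ===== SOURCE B (Python) =====
-- _coords = {
--     "7": (0, 0), "8": (1, 0), "9": (2, 0),
--     "4": (0, 1), "5": (1, 1), "6": (2, 1),
--     "1": (0, 2), "2": (1, 2), "3": (2, 2),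
--     "0": (1, 3), "A": (2, 3),
-- }
-- _gap = (0, 3)
-- _step = {">": (1, 0), "<": (-1, 0), "^": (0, -1), "v": (0, 1)}
--
-- def _safe(pos, moves):
--     x, y = pos
--     for ch in moves:
--         dx, dy = _step[ch]
--         x, y = x + dx, y + dy
--         if (x, y) == _gap:
--             return False
--     return True
--
-- def numpad2robot(numpad: str):
--     out = []
--     pos = _coords["A"]
--     for c in numpad:
--         tx, ty = _coords[c]
--         x, y = pos
--         s = "<" * (x - tx) + "^" * (y - ty) + "v" * (ty - y) + ">" * (tx - x)
--         if not _safe(pos, s):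
--             s = s[::-1]
--         out.append(s + "A")
--         pos = (tx, ty)
--     return "".join(out)
-- ===== Notes on version B (the rewrite author's own statement) =====
-- stated objective: alternative
-- what changed: B builds only the one canonical move string (<,^,v,> groups), then simulates walking it cell by cell and reverses the whole string if the walk steps onto the keypad gap, instead of A's coordinate corner formula with two duplicated branch orderings.
import Mathlib
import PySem

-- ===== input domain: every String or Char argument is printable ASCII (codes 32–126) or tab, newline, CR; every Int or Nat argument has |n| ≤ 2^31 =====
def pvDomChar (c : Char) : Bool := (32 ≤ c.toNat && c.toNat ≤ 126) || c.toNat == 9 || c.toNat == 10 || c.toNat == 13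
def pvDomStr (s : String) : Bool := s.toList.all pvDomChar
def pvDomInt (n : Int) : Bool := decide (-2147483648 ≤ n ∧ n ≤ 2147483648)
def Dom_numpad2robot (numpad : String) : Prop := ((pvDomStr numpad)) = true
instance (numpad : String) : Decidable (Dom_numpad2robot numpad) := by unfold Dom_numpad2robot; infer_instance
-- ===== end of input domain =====

-- B builds one canonical move string and reverses it if simulating the walk hits the keypad
-- gap, instead of A's corner formula with two duplicated branch orderings; equivalence is
-- proved on Pre_ (all characters are numpad keys).

-- ===== PORT A =====
-- the module-level dict numpad_coords; complex a+bj is ported as the pair (a, b)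
def numpadCoords : PySem.Dict Char (Int × Int) :=
  PySem.Dict.ofList [('7', (0, 0)), ('8', (1, 0)), ('9', (2, 0)),
                     ('4', (0, 1)), ('5', (1, 1)), ('6', (2, 1)),
                     ('1', (0, 2)), ('2', (1, 2)), ('3', (2, 2)),
                     ('0', (1, 3)), ('A', (2, 3))]

-- forbidden_numpad = 0 + 3j
def forbiddenNumpad : Int × Int := (0, 3)

-- the body of A's for-loop for one character (getD (0,0) is exact under Pre_: both keys present)
def stepMoveA (curPos c : Char) : List Char :=
  let cc := numpadCoords.getD c (0, 0)
  let pc := numpadCoords.getD curPos (0, 0)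
  let diff : Int × Int := (cc.1 - pc.1, cc.2 - pc.2)
  let movement : List Char :=
    if (cc.1, pc.2) = forbiddenNumpad ∨ (pc.1, cc.2) = forbiddenNumpad then
      (if diff.1 > 0 then List.replicate diff.1.toNat '>' else []) ++
      (if diff.2 ≥ 0 then List.replicate diff.2.toNat 'v' else []) ++
      (if diff.2 < 0 then List.replicate (-diff.2).toNat '^' else []) ++
      (if diff.1 ≤ 0 then List.replicate (-diff.1).toNat '<' else [])
    else
      (if diff.1 ≤ 0 then List.replicate (-diff.1).toNat '<' else []) ++
      (if diff.2 < 0 then List.replicate (-diff.2).toNat '^' else []) ++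
      (if diff.2 ≥ 0 then List.replicate diff.2.toNat 'v' else []) ++
      (if diff.1 > 0 then List.replicate diff.1.toNat '>' else [])
  movement ++ ['A']

def numpad2robot (numpad : String) : String :=
  String.ofList (numpad.toList.foldl
    (fun (st : Char × List (List Char)) c => (c, st.2 ++ [stepMoveA st.1 c]))
    ('A', [])).2.flatten  -- "".join(movements_numpad)

-- ===== PORT B =====
-- B's coordinate dict (same grid)
def coordsB : PySem.Dict Char (Int × Int) :=
  PySem.Dict.ofList [('7', (0, 0)), ('8', (1, 0)), ('9', (2, 0)),
                     ('4', (0, 1)), ('5', (1, 1)), ('6', (2, 1)),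
                     ('1', (0, 2)), ('2', (1, 2)), ('3', (2, 2)),
                     ('0', (1, 3)), ('A', (2, 3))]

def gapB : Int × Int := (0, 3)

-- _step: the unit vector of one arrow key
def stepDirB (ch : Char) : Int × Int :=
  if ch = '>' then (1, 0) else if ch = '<' then (-1, 0)
  else if ch = '^' then (0, -1) else (0, 1)

-- _safe: simulate the walk cell by cell, False as soon as it steps onto the gap
def safeB : (Int × Int) → List Char → Bool
  | _, [] => true
  | (x, y), ch :: t =>
      let d := stepDirB ch
      let p : Int × Int := (x + d.1, y + d.2)
      if p = gapB then false else safeB p t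

-- the body of B's for-loop for one character
def stepMoveB (pos : Int × Int) (tgt : Int × Int) : List Char :=
  let s := List.replicate (pos.1 - tgt.1).toNat '<' ++ List.replicate (pos.2 - tgt.2).toNat '^' ++
           List.replicate (tgt.2 - pos.2).toNat 'v' ++ List.replicate (tgt.1 - pos.1).toNat '>'
  (if safeB pos s then s else s.reverse) ++ ['A']

def numpad2robot_alt (numpad : String) : String :=
  String.ofList (numpad.toList.foldl
    (fun (st : (Int × Int) × List Char) c =>
      let t := coordsB.getD c (0, 0)
      (t, st.2 ++ stepMoveB st.1 t))
    (coordsB.getD 'A' (0, 0), [])).2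

-- ===== PRECONDITION & SPEC =====
def pvKeys : List Char := ['7', '8', '9', '4', '5', '6', '1', '2', '3', '0', 'A']

-- A raises KeyError on any character that is not a numpad key; those inputs are excluded.
def Pre_numpad2robot (numpad : String) : Prop := numpad.toList.all (fun c => pvKeys.contains c) = true
instance (numpad : String) : Decidable (Pre_numpad2robot numpad) := by
  unfold Pre_numpad2robot; infer_instance

def pvWitness_numpad2robot : String := "029A"

def Spec_numpad2robot (numpad : String) (out : String) : Prop := out = numpad2robot_alt numpad
instance (numpad : String) (out : String) : Decidable (Spec_numpad2robot numpad out) := by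
  unfold Spec_numpad2robot; infer_instance

-- ===== CLAIM (what is proved, stated in full; the proofs are below) =====
def Claim_equal_numpad2robot : Prop := ∀ (numpad : String), Dom_numpad2robot numpad → Pre_numpad2robot numpad → Spec_numpad2robot numpad (numpad2robot numpad)

-- ===== LEMMAS AND PROOFS =====

-- B's simulate-and-reverse move equals A's inline move for every pair of keys (121 closed cases)
theorem stepMoveB_eq_bool :
    (pvKeys.all fun p => pvKeys.all fun c =>
      stepMoveB (coordsB.getD p (0, 0)) (coordsB.getD c (0, 0)) == stepMoveA p c) = true := by rfl

theorem stepMoveB_eq : ∀ p ∈ pvKeys, ∀ c ∈ pvKeys,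
    stepMoveB (coordsB.getD p (0, 0)) (coordsB.getD c (0, 0)) = stepMoveA p c := by
  intro p hp c hc
  have h := List.all_eq_true.mp stepMoveB_eq_bool p hp
  exact eq_of_beq (List.all_eq_true.mp h c hc)

-- A's accumulated list of movement strings, characterised pair-by-pair
def movesA : Char → List Char → List (List Char)
  | _, [] => []
  | p, c :: t => stepMoveA p c :: movesA c t

theorem foldA_eq (l : List Char) (p : Char) (acc : List (List Char)) :
    (l.foldl (fun (st : Char × List (List Char)) c => (c, st.2 ++ [stepMoveA st.1 c])) (p, acc)).2
      = acc ++ movesA p l := by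
  induction l generalizing p acc with
  | nil => simp [movesA]
  | cons c t ih => simp [movesA, ih, List.append_assoc]

theorem foldB_eq (l : List Char) (p : Char) (acc : List Char) (hp : p ∈ pvKeys)
    (hl : ∀ c ∈ l, c ∈ pvKeys) :
    (l.foldl (fun (st : (Int × Int) × List Char) c =>
        let t := coordsB.getD c (0, 0)
        (t, st.2 ++ stepMoveB st.1 t)) (coordsB.getD p (0, 0), acc)).2
      = acc ++ (movesA p l).flatten := by
  induction l generalizing p acc with
  | nil => simp [movesA]
  | cons c t ih =>
    have hc : c ∈ pvKeys := hl c (by simp)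
    have ht : ∀ x ∈ t, x ∈ pvKeys := fun x hx => hl x (by simp [hx])
    simp only [List.foldl_cons, movesA, List.flatten_cons,
      stepMoveB_eq p hp c hc, ih c (acc ++ stepMoveA p c) hc ht, List.append_assoc]

-- ===== VERDICT (by name: the statement is the Claim_ definition above) =====
theorem numpad2robot_spec : Claim_equal_numpad2robot := by
  intro numpad _ hpre
  have hmem : ∀ c ∈ numpad.toList, c ∈ pvKeys := by
    intro c hc
    have h := List.all_eq_true.mp hpre c hc
    simpa using h
  unfold Spec_numpad2robot numpad2robot numpad2robot_alt
  rw [foldA_eq, foldB_eq numpad.toList 'A' [] (by decide) hmem]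
  simp
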